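-- pv_equiv track=rewrite | github.com/uforia/MatterBot | commands/qualys/command.py | normalizeFields
-- ===== SOURCE A (Python) =====
-- def normalizeFields(filters: list):
--     normalization = { # Simplify handling the case sensitivity of the CSAM API (seriously!?)
--         'assetname': 'assetName',
--         'dnsname': 'dnsName',
--         'operatingsystem': 'operatingSystem',
--     }
--     for filter in filters:
--         if filter.lower() in normalization:
--             filters = list(map(lambda _: _.replace(filter,normalization[filter.lower()]),filters))
--     return filters
-- ===== SOURCE B (Python) =====
-- def normalizeFields(filters: list):
--     normalization = {
--         'assetname': 'assetName',
--         'dnsname': 'dnsName',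
--         'operatingsystem': 'operatingSystem',
--     }
--     # replacement pairs, in the order A's loop encounters them
--     pairs = [(f, normalization[f.lower()]) for f in filters if f.lower() in normalization]
--     # transform each DISTINCT filter string exactly once, memoized in a hash table
--     table = {}
--     for s in dict.fromkeys(filters):
--         t = s
--         for old, new in pairs:
--             t = t.replace(old, new)
--         table[s] = t
--     # output is a pure table lookup per position
--     return [table[s] for s in filters]
-- ===== Notes on version B (the rewrite author's own statement) =====
-- stated objective: alternative
-- what changed: Instead of A's rebuilding the whole list once per matching filter, B stages the work: it collects the replacement pairs, transforms each DISTINCT filter string exactly once into a hash table (memoization over dict.fromkeys), and emits the output as a pure per-position table lookup, so duplicate strings are transformed only once.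
import Mathlib
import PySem

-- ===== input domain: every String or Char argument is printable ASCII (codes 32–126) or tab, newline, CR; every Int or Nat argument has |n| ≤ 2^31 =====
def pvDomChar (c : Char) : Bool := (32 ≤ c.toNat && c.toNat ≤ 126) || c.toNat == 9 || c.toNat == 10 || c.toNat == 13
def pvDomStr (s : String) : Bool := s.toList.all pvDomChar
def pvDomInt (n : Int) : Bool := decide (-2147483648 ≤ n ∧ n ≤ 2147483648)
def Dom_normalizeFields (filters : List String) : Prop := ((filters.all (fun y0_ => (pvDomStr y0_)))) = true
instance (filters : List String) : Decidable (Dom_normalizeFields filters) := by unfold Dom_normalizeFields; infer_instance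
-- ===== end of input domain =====

-- B stages the work differently from A: it transforms each DISTINCT filter string once,
-- memoized in a hash table, and emits the output by per-position table lookup, instead of
-- A's re-mapping of the whole list once per matching filter. Return-value equivalence only.


-- ===== PORT A =====
-- the 'normalization' dict, shared by both ports
def pvNorm : PySem.Dict String String :=
  PySem.Dict.ofList [("assetname", "assetName"), ("dnsname", "dnsName"),
                     ("operatingsystem", "operatingSystem")]

-- A: for each filter of the ORIGINAL list (Python iterates the list bound at loop entry)
-- whose lowercase is a key, re-map the whole current list with that replace.
def normalizeFields (filters : List String) : List String :=
  filters.foldl (fun fs filt =>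
    match PySem.Dict.get? pvNorm (PySem.Str.lower filt) with
    | some r => fs.map (fun s => PySem.Str.replace s filt r)
    | none => fs) filters

-- ===== PORT B =====
-- B: collect the (old, new) pairs; build a memo table transforming each DISTINCT filter
-- (dict.fromkeys = PySem.List.dedup) exactly once; output by table lookup per position.
-- (table[s] in Python: the key is always present, so the lookup is ported as get? with a
--  default that is never used.)
def normalizeFields_alt (filters : List String) : List String :=
  let pairs := filters.filterMap (fun f =>
    (PySem.Dict.get? pvNorm (PySem.Str.lower f)).map (fun r => (f, r)))
  let table := (PySem.List.dedup filters).foldl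
    (fun d s => PySem.Dict.insert d s
      (pairs.foldl (fun t p => PySem.Str.replace t p.1 p.2) s))
    (PySem.Dict.empty)
  filters.map (fun s => (PySem.Dict.get? table s).getD s)

-- ===== PRECONDITION & SPEC =====
def Spec_normalizeFields (filters : List String) (out : List String) : Prop := out = normalizeFields_alt filters
instance (filters : List String) (out : List String) : Decidable (Spec_normalizeFields filters out) := by unfold Spec_normalizeFields; infer_instance

-- ===== CLAIM (what is proved, stated in full; the proofs are below) =====
def Claim_equal_normalizeFields : Prop := ∀ (filters : List String), Dom_normalizeFields filters → Spec_normalizeFields filters (normalizeFields filters)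

-- ===== LEMMAS AND PROOFS =====

-- A's loop equals a fold over the collected replacement pairs, each step a whole-list map.
theorem foldA_eq_foldPairs (fl : List String) : ∀ (acc : List String),
    fl.foldl (fun fs filt =>
      match PySem.Dict.get? pvNorm (PySem.Str.lower filt) with
      | some r => fs.map (fun s => PySem.Str.replace s filt r)
      | none => fs) acc
    = (fl.filterMap (fun f =>
        (PySem.Dict.get? pvNorm (PySem.Str.lower f)).map (fun r => (f, r)))).foldl
        (fun fs p => fs.map (fun s => PySem.Str.replace s p.1 p.2)) acc := by
  induction fl with
  | nil => intro acc; rfl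
  | cons f rest ih =>
    intro acc
    cases h : PySem.Dict.get? pvNorm (PySem.Str.lower f) with
    | none => simp [List.foldl_cons, h, ih]
    | some r => simp [List.foldl_cons, h, ih]

-- Loop interchange: folding whole-list maps = mapping a per-string fold.
theorem foldPairs_eq_mapFold (repls : List (String × String)) : ∀ (xs : List String),
    repls.foldl (fun fs p => fs.map (fun s => PySem.Str.replace s p.1 p.2)) xs
    = xs.map (fun s => repls.foldl (fun t p => PySem.Str.replace t p.1 p.2) s) := by
  induction repls with
  | nil => intro xs; simp
  | cons p rest ih =>
    intro xs
    simp [List.foldl_cons, ih, List.map_map, Function.comp]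

-- Keys not touched by the insert loop keep their lookup.
theorem get?_foldl_insert_of_not_mem (g : String → String) (ds : List String) :
    ∀ (d : PySem.Dict String String) (s : String), s ∉ ds →
    PySem.Dict.get? (ds.foldl (fun d k => PySem.Dict.insert d k (g k)) d) s
      = PySem.Dict.get? d s := by
  induction ds with
  | nil => intro d s _; rfl
  | cons k rest ih =>
    intro d s hs
    have h1 : s ≠ k := fun h => hs (h ▸ List.mem_cons_self)
    have h2 : s ∉ rest := fun h => hs (List.mem_cons_of_mem _ h)
    simp [List.foldl_cons, ih _ _ h2, PySem.Dict.get?_insert_of_ne _ _ h1]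

-- The memo table built over ds answers g s for every s ∈ ds.
theorem get?_foldl_insert_of_mem (g : String → String) (ds : List String) :
    ∀ (d : PySem.Dict String String) (s : String), s ∈ ds →
    PySem.Dict.get? (ds.foldl (fun d k => PySem.Dict.insert d k (g k)) d) s
      = some (g s) := by
  induction ds with
  | nil => intro d s hs; cases hs
  | cons k rest ih =>
    intro d s hs
    by_cases hr : s ∈ rest
    · simpa [List.foldl_cons] using ih _ s hr
    · have hk : s = k := by
        rcases List.mem_cons.mp hs with h | h
        · exact h
        · exact absurd h hr
      subst hk
      simp [List.foldl_cons, get?_foldl_insert_of_not_mem g rest _ _ hr,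
            PySem.Dict.get?_insert_self]

-- ===== VERDICT (by name: the statement is the Claim_ definition above) =====
theorem normalizeFields_spec : Claim_equal_normalizeFields := by
  intro filters _
  unfold Spec_normalizeFields normalizeFields normalizeFields_alt
  rw [foldA_eq_foldPairs, foldPairs_eq_mapFold]
  apply List.map_congr_left
  intro s hs
  rw [get?_foldl_insert_of_mem _ _ _ _ ((PySem.List.mem_dedup _ _).mpr hs)]
  rfl
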